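-- pv_equiv track=rewrite | github.com/stovag/qubo-tsp-solver | qubo_tsp_solver/qubo_tsp_solver.py | pretty_solution
-- ===== SOURCE A (Python) =====
-- def pretty_solution(solution, value, n):
--     path_matrix = []
--     path = []
--     flag = 0
--
--     for i in range(0, max(solution.keys()), n):
--         path_matrix.append([])
--         for j in range(i, i+n):
--             path_matrix[flag].append(solution[j])
--         flag += 1
--
--     for j in range(len(path_matrix)):
--         for i in range(len(path_matrix)):
--             if path_matrix[i][j] == 1:
--                 path.append(i+1)
--                 break
--
--     return path, path_matrix
-- ===== SOURCE B (Python) =====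
-- def pretty_solution(solution, value, n):
--     path_matrix = []
--     for i in range(0, max(solution.keys()), n):
--         path_matrix.append([solution[j] for j in range(i, i + n)])
--     r = len(path_matrix)
--     col_to_row = {}
--     for i in range(r):
--         for j in range(r):
--             if j not in col_to_row and path_matrix[i][j] == 1:
--                 col_to_row[j] = i
--     path = [col_to_row[j] + 1 for j in sorted(col_to_row)]
--     return path, path_matrix
-- ===== Notes on version B (the rewrite author's own statement) =====
-- stated objective: alternative
-- what changed: A extracts the path column-by-column, rescanning the matrix for each column with a break; B makes one row-major pass over the cells building a col_to_row dict (first row wins per column) and then reconstructs path from the sorted dict keys.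
import Mathlib
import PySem

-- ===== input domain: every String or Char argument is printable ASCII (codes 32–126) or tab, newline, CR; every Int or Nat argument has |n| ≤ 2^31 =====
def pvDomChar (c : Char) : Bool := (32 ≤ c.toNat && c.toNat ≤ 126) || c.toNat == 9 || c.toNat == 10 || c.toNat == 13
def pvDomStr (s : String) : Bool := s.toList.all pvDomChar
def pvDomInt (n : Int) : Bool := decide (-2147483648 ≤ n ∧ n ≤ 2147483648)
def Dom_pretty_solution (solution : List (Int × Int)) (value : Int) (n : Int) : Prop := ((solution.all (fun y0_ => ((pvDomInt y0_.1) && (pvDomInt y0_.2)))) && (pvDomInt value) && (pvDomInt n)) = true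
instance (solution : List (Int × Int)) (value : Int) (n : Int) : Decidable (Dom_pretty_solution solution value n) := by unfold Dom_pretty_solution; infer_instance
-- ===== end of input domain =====

-- B replaces A's per-column break-rescans by one row-major pass over the matrix cells that records,
-- in a dict, the first (smallest) row holding a 1 for each column, and then rebuilds the path from
-- the sorted dict keys (alternative decomposition, same asymptotic cost).

-- ===== PORT A =====
-- inner break-scan of A's path loop: for i in range(len(pm)): if pm[i][j] == 1: append(i+1); break
def pvScanCol (pm : List (List Int)) (j : Int) (path : List Int) : List Int → List Int
  | [] => path
  | i :: rest =>
      if PySem.List.pyGetD (PySem.List.pyGetD pm i []) j 0 = 1 then path ++ [i + 1]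
      else pvScanCol pm j path rest

def pretty_solution (solution : List (Int × Int)) (value : Int) (n : Int) : List Int × List (List Int) :=
  let d := PySem.Dict.ofList solution
  let m := (PySem.List.max? d.keys (fun x => x)).getD 0     -- max(solution.keys()); Pre_ excludes the empty dict
  let path_matrix := (PySem.List.pyRange 0 m n).foldl
      (fun pm i => pm ++ [(PySem.List.pyRange i (i + n) 1).foldl
          (fun row j => row ++ [d.getD j 0]) []]) []        -- solution[j]; Pre_ excludes missing keys
  let path := (PySem.List.pyRange 0 (PySem.List.len path_matrix) 1).foldl
      (fun acc j => pvScanCol path_matrix j acc (PySem.List.pyRange 0 (PySem.List.len path_matrix) 1)) []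
  (path, path_matrix)

-- ===== PORT B =====
def pretty_solution_alt (solution : List (Int × Int)) (value : Int) (n : Int) : List Int × List (List Int) :=
  let d := PySem.Dict.ofList solution
  let m := (PySem.List.max? d.keys (fun x => x)).getD 0     -- max(solution.keys()); Pre_ excludes the empty dict
  let path_matrix := (PySem.List.pyRange 0 m n).map
      (fun i => (PySem.List.pyRange i (i + n) 1).map (fun j => d.getD j 0))   -- solution[j]
  let r := PySem.List.len path_matrix
  let col_to_row := (PySem.List.pyRange 0 r 1).foldl
      (fun c i => (PySem.List.pyRange 0 r 1).foldl
          (fun c j => if c.get? j = none ∧ PySem.List.pyGetD (PySem.List.pyGetD path_matrix i []) j 0 = 1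
                      then c.insert j i else c) c)
      (PySem.Dict.empty : PySem.Dict Int Int)
  let path := (PySem.List.sorted col_to_row.keys (fun x => x)).map (fun j => col_to_row.getD j 0 + 1)
  (path, path_matrix)

-- ===== PRECONDITION & SPEC =====
-- Pre_ excludes exactly the inputs on which the Python A raises: the empty dict (max() of an empty
-- sequence, ValueError), step n = 0 (range, ValueError), a key in 0..r*n-1 missing (KeyError),
-- and a positive row count r exceeding the row length n (IndexError in the path loop).
def Pre_pretty_solution (solution : List (Int × Int)) (value : Int) (n : Int) : Prop :=
  let d := PySem.Dict.ofList solution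
  let r : Int := ((PySem.List.pyRange 0 ((PySem.List.max? d.keys (fun x => x)).getD 0) n).length : Int)
  solution ≠ [] ∧ n ≠ 0 ∧
  r * n ≤ (d.size : Int) ∧     -- needed for all keys 0..r*n-1 to exist; keeps the next range small
  (∀ k ∈ PySem.List.pyRange 0 (if r * n ≤ (d.size : Int) then r * n else 0) 1, (d.get? k).isSome) ∧
  (r ≤ n ∨ r = 0)
instance (solution : List (Int × Int)) (value : Int) (n : Int) : Decidable (Pre_pretty_solution solution value n) := by
  unfold Pre_pretty_solution; infer_instance

def pvWitness_pretty_solution : (List (Int × Int)) × Int × Int := ([(0, 1), (1, 0), (2, 0), (3, 1)], 7, 2)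

def Spec_pretty_solution (solution : List (Int × Int)) (value : Int) (n : Int) (out : List Int × List (List Int)) : Prop := out = pretty_solution_alt solution value n
instance (solution : List (Int × Int)) (value : Int) (n : Int) (out : List Int × List (List Int)) : Decidable (Spec_pretty_solution solution value n out) := by unfold Spec_pretty_solution; infer_instance

-- ===== CLAIM (what is proved, stated in full; the proofs are below) =====
def Claim_equal_pretty_solution : Prop := ∀ (solution : List (Int × Int)) (value : Int) (n : Int), Dom_pretty_solution solution value n → Pre_pretty_solution solution value n → Spec_pretty_solution solution value n (pretty_solution solution value n)

-- ===== LEMMAS AND PROOFS =====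

-- A's break-scan is find?
theorem pvScanCol_eq_find (pm : List (List Int)) (j : Int) (acc : List Int) (l : List Int) :
    pvScanCol pm j acc l =
      acc ++ ((l.find? (fun i => decide (PySem.List.pyGetD (PySem.List.pyGetD pm i []) j 0 = 1))).map
        (fun i => i + 1)).toList := by
  induction l with
  | nil => simp [pvScanCol]
  | cons i rest ih =>
      by_cases h : PySem.List.pyGetD (PySem.List.pyGetD pm i []) j 0 = 1 <;>
        simp [pvScanCol, h, ih]

-- flatMap over an option-producing body as filter-then-map
theorem flatMap_option_toList (J : List Int) (o : Int → Option Int) :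
    J.flatMap (fun j => ((o j).map (fun i => i + 1)).toList) =
      (J.filter (fun j => (o j).isSome)).map (fun j => (o j).getD 0 + 1) := by
  induction J with
  | nil => rfl
  | cons j J ih => cases h : o j <;> simp [h, ih]

-- get? after B's inner (one-row) fold
theorem pvInner_get? (p : Int → Prop) [DecidablePred p] (v : Int) (J : List Int)
    (c : PySem.Dict Int Int) (x : Int) :
    (J.foldl (fun c j => if c.get? j = none ∧ p j then c.insert j v else c) c).get? x =
      if x ∈ J ∧ c.get? x = none ∧ p x then some v else c.get? x := by
  induction J generalizing c with
  | nil => simp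
  | cons j J ih =>
      simp only [List.foldl_cons]
      by_cases hg : c.get? j = none ∧ p j
      · rw [if_pos hg, ih]
        by_cases hx : x = j
        · subst hx
          simp [PySem.Dict.get?_insert_self, hg.1, hg.2]
        · rw [PySem.Dict.get?_insert_of_ne _ _ hx]
          by_cases hm : x ∈ J <;> simp [hx, hm]
      · rw [if_neg hg, ih]
        by_cases hx : x = j
        · subst hx
          rcases Decidable.not_and_iff_not_or_not.mp hg with h | h <;>
            by_cases hm : x ∈ J <;> simp_all
        · simp [hx]

-- get? after B's full double fold
theorem pvOuter_get? (q : Int → Int → Prop) [∀ i j, Decidable (q i j)] (J : List Int)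
    (I : List Int) (c : PySem.Dict Int Int) (x : Int) :
    (I.foldl (fun c i => J.foldl
        (fun c j => if c.get? j = none ∧ q i j then c.insert j i else c) c) c).get? x =
      (c.get? x).or (if x ∈ J then I.find? (fun i => decide (q i x)) else none) := by
  induction I generalizing c with
  | nil => by_cases hx : x ∈ J <;> simp [hx]
  | cons i I ih =>
      simp only [List.foldl_cons]
      rw [ih, pvInner_get? (q i) i J c x]
      by_cases hm : x ∈ J
      · cases hc : c.get? x with
        | some v => simp [hm]
        | none =>
            by_cases hq : q i x
            · simp [hm, hq]
            · simp [hm, hq]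
      · simp [hm]

-- keys stay unique through B's conditional-insert folds
theorem pvInner_nodup (p : Int → Prop) [DecidablePred p] (v : Int) (J : List Int)
    (c : PySem.Dict Int Int) (h : c.keys.Nodup) :
    ((J.foldl (fun c j => if c.get? j = none ∧ p j then c.insert j v else c) c).keys).Nodup := by
  induction J generalizing c with
  | nil => exact h
  | cons j J ih =>
      simp only [List.foldl_cons]
      by_cases hg : c.get? j = none ∧ p j
      · rw [if_pos hg]; exact ih _ (PySem.Dict.nodup_keys_insert _ _ _ h)
      · rw [if_neg hg]; exact ih _ h

theorem pvOuter_nodup (q : Int → Int → Prop) [∀ i j, Decidable (q i j)] (J I : List Int)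
    (c : PySem.Dict Int Int) (h : c.keys.Nodup) :
    ((I.foldl (fun c i => J.foldl
        (fun c j => if c.get? j = none ∧ q i j then c.insert j i else c) c) c).keys).Nodup := by
  induction I generalizing c with
  | nil => exact h
  | cons i I ih =>
      simp only [List.foldl_cons]
      exact ih _ (pvInner_nodup (q i) i J c h)

-- a unit-step range is strictly increasing
theorem pyRange_one_pairwise_lt (a b : Int) :
    (PySem.List.pyRange a b 1).Pairwise (· < ·) := by
  rw [PySem.List.pyRange_one]
  refine List.Pairwise.map (R := fun (x y : Nat) => x < y) _ (fun x y h => by omega) ?_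
  exact List.pairwise_lt_range

-- sorted keys of B's dict = the columns of the range holding a 1, in range order
theorem pvSorted_keys (q : Int → Int → Prop) [∀ i j, Decidable (q i j)] (J : List Int)
    (hJ : J.Pairwise (· < ·)) :
    PySem.List.sorted ((J.foldl (fun c i => J.foldl
        (fun c j => if c.get? j = none ∧ q i j then c.insert j i else c) c)
        (PySem.Dict.empty : PySem.Dict Int Int)).keys) (fun x => x) false =
      J.filter (fun j => (J.find? (fun i => decide (q i j))).isSome) := by
  set D := J.foldl (fun c i => J.foldl
      (fun c j => if c.get? j = none ∧ q i j then c.insert j i else c) c)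
      (PySem.Dict.empty : PySem.Dict Int Int) with hD
  have hget : ∀ x, D.get? x = if x ∈ J then J.find? (fun i => decide (q i x)) else none := by
    intro x
    rw [hD, pvOuter_get? q J J PySem.Dict.empty x]
    simp
  have hnodupD : D.keys.Nodup := pvOuter_nodup q J J _ (by simp [PySem.Dict.keys_empty])
  have hnodupJ : J.Nodup := hJ.nodup
  have hmem : ∀ x, x ∈ D.keys ↔ x ∈ J.filter (fun j => (J.find? (fun i => decide (q i j))).isSome) := by
    intro x
    rw [List.mem_filter]
    constructor
    · intro hx
      have : D.get? x ≠ none := by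
        rw [Ne, PySem.Dict.get?_eq_none_iff_not_mem_keys]
        simp [hx]
      rw [hget x] at this
      by_cases hxJ : x ∈ J
      · refine ⟨hxJ, ?_⟩
        simp only [if_pos hxJ] at this
        simpa [Option.isSome_iff_ne_none] using this
      · simp [hxJ] at this
    · rintro ⟨hxJ, hs⟩
      have : D.get? x ≠ none := by
        rw [hget x, if_pos hxJ]
        simpa [Option.isSome_iff_ne_none] using hs
      rw [Ne, PySem.Dict.get?_eq_none_iff_not_mem_keys] at this
      simpa using this
  refine PySem.List.sorted_eq_of_perm_of_pairwise_lt _ _ (fun x => x) ?_ ?_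
  · refine (List.perm_ext_iff_of_nodup (hnodupJ.filter _) hnodupD).mpr ?_
    intro a; exact (hmem a).symm
  · exact hJ.filter _

-- the two path extractions agree on ANY matrix
theorem path_eq (pm : List (List Int)) (L : Int) :
    (PySem.List.pyRange 0 L 1).foldl
        (fun acc j => pvScanCol pm j acc (PySem.List.pyRange 0 L 1)) [] =
      (PySem.List.sorted (((PySem.List.pyRange 0 L 1).foldl
            (fun c i => (PySem.List.pyRange 0 L 1).foldl
              (fun c j => if c.get? j = none ∧ PySem.List.pyGetD (PySem.List.pyGetD pm i []) j 0 = 1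
                          then c.insert j i else c) c)
            (PySem.Dict.empty : PySem.Dict Int Int)).keys) (fun x => x) false).map
        (fun j => ((PySem.List.pyRange 0 L 1).foldl
            (fun c i => (PySem.List.pyRange 0 L 1).foldl
              (fun c j => if c.get? j = none ∧ PySem.List.pyGetD (PySem.List.pyGetD pm i []) j 0 = 1
                          then c.insert j i else c) c)
            (PySem.Dict.empty : PySem.Dict Int Int)).getD j 0 + 1) := by
  set J := PySem.List.pyRange 0 L 1 with hJdef
  set q : Int → Int → Prop := fun i j => PySem.List.pyGetD (PySem.List.pyGetD pm i []) j 0 = 1 with hq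
  set D := J.foldl (fun c i => J.foldl
      (fun c j => if c.get? j = none ∧ q i j then c.insert j i else c) c)
      (PySem.Dict.empty : PySem.Dict Int Int) with hD
  have hget : ∀ x, D.get? x = if x ∈ J then J.find? (fun i => decide (q i x)) else none := by
    intro x
    rw [hD, pvOuter_get? q J J PySem.Dict.empty x]
    simp
  -- left side: foldl of break-scans = flatMap = filter-then-map of find?
  have h1 : (fun (acc : List Int) (j : Int) => pvScanCol pm j acc J) =
      (fun acc j => acc ++ ((J.find? (fun i => decide (q i j))).map (fun i => i + 1)).toList) := by
    funext acc j; exact pvScanCol_eq_find pm j acc J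
  rw [h1, PySem.List.foldl_append_eq_flatMap, List.nil_append,
    flatMap_option_toList J (fun j => J.find? (fun i => decide (q i j)))]
  -- right side: sorted keys = the same filter, getD = the find?
  rw [pvSorted_keys q J (pyRange_one_pairwise_lt 0 L)]
  apply List.map_congr_left
  intro j hj
  rcases List.mem_filter.mp hj with ⟨hjJ, hs⟩
  rw [PySem.Dict.getD_eq_get?_getD, hget j, if_pos hjJ]

-- ===== VERDICT (by name: the statement is the Claim_ definition above) =====
theorem pretty_solution_spec : Claim_equal_pretty_solution := by
  intro solution value n _ _
  unfold Spec_pretty_solution pretty_solution pretty_solution_alt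
  dsimp only
  set d := PySem.Dict.ofList solution with hd
  set m := (PySem.List.max? d.keys (fun x => x)).getD 0 with hm
  set g : Int → Int := fun j => d.getD j 0 with hg
  have hrowfold : ∀ i : Int, (PySem.List.pyRange i (i + n) 1).foldl
      (fun row j => row ++ [d.getD j 0]) [] = (PySem.List.pyRange i (i + n) 1).map g := by
    intro i
    rw [PySem.List.foldl_append_singleton_eq_map g (PySem.List.pyRange i (i + n) 1) []]
    rfl
  have hpmA : (PySem.List.pyRange 0 m n).foldl
      (fun pm i => pm ++ [(PySem.List.pyRange i (i + n) 1).foldl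
          (fun row j => row ++ [d.getD j 0]) []]) [] =
      (PySem.List.pyRange 0 m n).map (fun i => (PySem.List.pyRange i (i + n) 1).map g) := by
    have := PySem.List.foldl_append_singleton_eq_map
      (fun i => (PySem.List.pyRange i (i + n) 1).foldl (fun row j => row ++ [d.getD j 0]) [])
      (PySem.List.pyRange 0 m n) []
    rw [this, List.nil_append]
    exact List.map_congr_left (fun i _ => hrowfold i)
  rw [hpmA]
  exact congrArg (fun p => (p, _)) (path_eq _ _)
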